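-- pv_equiv track=rewrite | github.com/taligen/taliwodo | web/update.py | key_value_array_to_dict
-- ===== SOURCE A (Python) =====
-- def key_value_array_to_dict(input_data):
--     parsed_dict = {}
--     for sub_dict in input_data:
--         key = sub_dict[ "name" ]
--         value = sub_dict[ "value" ]
--         if key in parsed_dict:
--             parsed_dict[ key ].append( value )
--         else:
--             parsed_dict[ key ] = [ value ]
--     return parsed_dict
-- ===== SOURCE B (Python) =====
-- def key_value_array_to_dict(input_data):
--     # One pass to extract (name, value) pairs, then build each group's full
--     # value list at the name's first occurrence via a filtering comprehension.
--     pairs = [(sub_dict["name"], sub_dict["value"]) for sub_dict in input_data]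
--     result = {}
--     for name, _value in pairs:
--         if name not in result:
--             result[name] = [v for n, v in pairs if n == name]
--     return result
-- ===== Notes on version B (the rewrite author's own statement) =====
-- stated objective: alternative
-- what changed: A buckets incrementally, appending each value to its key's growing list in one pass; B first extracts the (name, value) pairs, then inserts each name's complete value list at once (built by a filtering comprehension over all pairs) at the name's first occurrence.
import Mathlib
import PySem

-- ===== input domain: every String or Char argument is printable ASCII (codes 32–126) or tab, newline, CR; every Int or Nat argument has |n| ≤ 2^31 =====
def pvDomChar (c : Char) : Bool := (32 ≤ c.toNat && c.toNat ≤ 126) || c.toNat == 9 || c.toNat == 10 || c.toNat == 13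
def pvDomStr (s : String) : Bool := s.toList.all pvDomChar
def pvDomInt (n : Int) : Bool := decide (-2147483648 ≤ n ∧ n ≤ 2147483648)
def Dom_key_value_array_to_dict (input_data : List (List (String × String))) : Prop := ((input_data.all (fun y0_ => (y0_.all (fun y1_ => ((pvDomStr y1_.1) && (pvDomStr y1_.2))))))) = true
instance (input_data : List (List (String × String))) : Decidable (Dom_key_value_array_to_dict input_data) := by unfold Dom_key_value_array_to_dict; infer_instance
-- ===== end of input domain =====

-- B re-groups by building each name's complete value list at its first occurrence from an
-- extracted pair list, instead of A's incremental per-item bucket appending (alternative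
-- decomposition, same result); Pre_ excludes sub-dicts missing the "name" or "value" key,
-- on which the Python A raises KeyError.


-- ===== PORT A =====
-- sub_dict["name"] / sub_dict["value"]: KeyError (= none) is excluded by Pre_, so the
-- .getD "" default is never taken on admitted inputs.
def key_value_array_to_dict (input_data : List (List (String × String))) : List (String × List String) :=
  (input_data.foldl (fun parsed_dict sub_dict =>
      let key := ((PySem.Dict.mk sub_dict).get? "name").getD ""
      let value := ((PySem.Dict.mk sub_dict).get? "value").getD ""
      if parsed_dict.contains key then
        parsed_dict.insert key (parsed_dict.getD key [] ++ [value])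
      else
        parsed_dict.insert key [value])
    PySem.Dict.empty).items

-- ===== PORT B =====
def key_value_array_to_dict_alt (input_data : List (List (String × String))) : List (String × List String) :=
  let pairs := input_data.map (fun sub_dict =>
      (((PySem.Dict.mk sub_dict).get? "name").getD "", ((PySem.Dict.mk sub_dict).get? "value").getD ""))
  (pairs.foldl (fun result p =>
      if !(result.contains p.1) then
        result.insert p.1 ((pairs.filter (fun q => q.1 == p.1)).map (fun q => q.2))
      else result)
    PySem.Dict.empty).items

-- ===== PRECONDITION & SPEC =====
-- Pre_ excludes exactly the inputs where some sub-dict lacks "name" or "value": there the Python A raises KeyError.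
def Pre_key_value_array_to_dict (input_data : List (List (String × String))) : Prop :=
  (input_data.all (fun sub_dict =>
      ((PySem.Dict.mk sub_dict).get? "name").isSome && ((PySem.Dict.mk sub_dict).get? "value").isSome)) = true
instance (input_data : List (List (String × String))) : Decidable (Pre_key_value_array_to_dict input_data) := by unfold Pre_key_value_array_to_dict; infer_instance

def pvWitness_key_value_array_to_dict : (List (List (String × String))) :=
  [[("name", "a"), ("value", "1")], [("name", "b"), ("value", "2")], [("name", "a"), ("value", "3")]]

def Spec_key_value_array_to_dict (input_data : List (List (String × String))) (out : List (String × List String)) : Prop := out = key_value_array_to_dict_alt input_data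
instance (input_data : List (List (String × String))) (out : List (String × List String)) : Decidable (Spec_key_value_array_to_dict input_data out) := by unfold Spec_key_value_array_to_dict; infer_instance

-- ===== CLAIM (what is proved, stated in full; the proofs are below) =====
def Claim_equal_key_value_array_to_dict : Prop := ∀ (input_data : List (List (String × String))), Dom_key_value_array_to_dict input_data → Pre_key_value_array_to_dict input_data → Spec_key_value_array_to_dict input_data (key_value_array_to_dict input_data)

-- ===== LEMMAS AND PROOFS =====

-- the distinct elements of `ns` not in `seen`, in first-occurrence order
def pvNewNames (seen : List String) : List String → List String
  | [] => []
  | n :: ns => if n ∈ seen then pvNewNames seen ns else n :: pvNewNames (seen ++ [n]) ns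

lemma pv_update_eq_newNames (ns : List String) (s : PySem.Set String) :
    PySem.Set.update s ns = s ++ pvNewNames s ns := by
  induction ns generalizing s with
  | nil => simp [PySem.Set.update_nil, pvNewNames]
  | cons n ns ih =>
    rw [PySem.Set.update_cons, PySem.Set.add_eq_ite, pvNewNames]
    by_cases h : n ∈ s
    · simp [h, ih]
    · simp [h, ih (s ++ [n])]

lemma pv_bfold (g : String → List String) (l : List (String × String))
    (res : PySem.Dict String (List String)) :
    (l.foldl (fun r p => if !(r.contains p.1) then r.insert p.1 (g p.1) else r) res).items
      = res.items ++ (pvNewNames res.keys (l.map (fun p => p.1))).map (fun k => (k, g k)) := by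
  induction l generalizing res with
  | nil => simp [pvNewNames]
  | cons p l ih =>
    simp only [List.foldl_cons, List.map_cons, pvNewNames]
    by_cases h : res.contains p.1 = true
    · rw [if_neg (by simp [h] : ¬ ((!(res.contains p.1)) = true)),
        if_pos ((PySem.Dict.contains_iff_mem_keys res p.1).mp h)]
      exact ih res
    · have h' : res.contains p.1 = false := by simpa using h
      rw [if_pos (by simp [h'] : (!(res.contains p.1)) = true),
        if_neg (fun hm => h ((PySem.Dict.contains_iff_mem_keys res p.1).mpr hm))]
      rw [ih, PySem.Dict.items_insert_of_not_contains res _ h',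
        PySem.Dict.keys_insert_of_not_contains res _ h']
      simp

lemma pv_stepA_eq_modify (d : PySem.Dict String (List String)) (k v : String) :
    (if d.contains k then d.insert k (d.getD k [] ++ [v]) else d.insert k [v])
      = d.modify k [] (fun x => x ++ [v]) := by
  by_cases h : d.contains k = true
  · simp [h, PySem.Dict.modify]
  · have h' : d.contains k = false := by simpa using h
    simp [h', PySem.Dict.modify, PySem.Dict.getD_of_not_contains d [] h']

-- ===== VERDICT (by name: the statement is the Claim_ definition above) =====
theorem key_value_array_to_dict_spec : Claim_equal_key_value_array_to_dict := by
  intro input_data _ _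
  unfold Spec_key_value_array_to_dict key_value_array_to_dict key_value_array_to_dict_alt
  set pairs := input_data.map (fun sub_dict =>
      (((PySem.Dict.mk sub_dict).get? "name").getD "", ((PySem.Dict.mk sub_dict).get? "value").getD ""))
    with hpairs
  -- A's loop body is a grouping `modify`, and A's loop over sub-dicts is the same loop over `pairs`
  have hA : (input_data.foldl (fun parsed_dict sub_dict =>
      let key := ((PySem.Dict.mk sub_dict).get? "name").getD ""
      let value := ((PySem.Dict.mk sub_dict).get? "value").getD ""
      if parsed_dict.contains key then
        parsed_dict.insert key (parsed_dict.getD key [] ++ [value])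
      else
        parsed_dict.insert key [value])
      PySem.Dict.empty)
      = pairs.foldl (fun d p => d.modify p.1 [] (fun x => x ++ [p.2])) PySem.Dict.empty := by
    rw [hpairs, List.foldl_map]
    congr 1
    funext d sub
    exact pv_stepA_eq_modify d _ _
  rw [hA]
  -- characterize A's result: keys in first-occurrence order, each with its full value list
  have hnd : (pairs.foldl (fun d p => d.modify p.1 [] (fun x => x ++ [p.2])) PySem.Dict.empty).keys.Nodup := by
    exact PySem.Dict.nodup_keys_foldl_modify_key pairs (fun p => p.1) [] (fun _ p => fun x => x ++ [p.2]) PySem.Dict.empty (by simp)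
  rw [PySem.Dict.items_eq_map_keys _ hnd []]
  rw [PySem.Dict.keys_foldl_modify_key pairs (fun p => p.1) [] (fun _ p => fun x => x ++ [p.2]) PySem.Dict.empty]
  -- B's result via the fold lemma
  rw [pv_bfold (fun k => (pairs.filter (fun q => q.1 == k)).map (fun q => q.2)) pairs PySem.Dict.empty]
  have hkeys_empty : (PySem.Dict.empty : PySem.Dict String (List String)).keys = [] := by
    simp [PySem.Dict.keys, PySem.Dict.empty]
  have hitems_empty : (PySem.Dict.empty : PySem.Dict String (List String)).items = [] := rfl
  rw [hkeys_empty, hitems_empty, pv_update_eq_newNames]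
  simp only [List.nil_append]
  refine List.map_congr_left (fun k _ => ?_)
  rw [PySem.Dict.getD_foldl_modify_append pairs PySem.Dict.empty k]
  simp [PySem.Dict.getD_empty]
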